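-- pv_equiv track=rewrite | github.com/fzinnah17/codepath-weekly-assignments-TIP-102-4b | unit3-session1-2.py | validate_shelter_sequence
-- ===== SOURCE A (Python) =====
-- def validate_shelter_sequence(admitted, adopted):
--     stack = []
--     i = 0
--     for x in adopted:
--         while (not stack) or stack[-1] != x:
--             if i == len(admitted):
--                 return False
--             stack.append(admitted[i])
--             i += 1
--         stack.pop()
--     return True
-- ===== SOURCE B (Python) =====
-- def validate_shelter_sequence(admitted, adopted):
--     stack = []
--     j = 0
--     n = len(adopted)
--     for x in admitted:
--         stack.append(x)
--         while stack and j < n and stack[-1] == adopted[j]: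
--             stack.pop()
--             j += 1
--     return j == n
-- ===== Notes on version B (the rewrite author's own statement) =====
-- stated objective: idiomatic
-- what changed: B drives the loop by admitted (push each element, then greedily pop while the top matches the next adopted element, tracking index j) instead of A's adopted-driven push-until-match loop, and accepts iff j reaches len(adopted).
import Mathlib
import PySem

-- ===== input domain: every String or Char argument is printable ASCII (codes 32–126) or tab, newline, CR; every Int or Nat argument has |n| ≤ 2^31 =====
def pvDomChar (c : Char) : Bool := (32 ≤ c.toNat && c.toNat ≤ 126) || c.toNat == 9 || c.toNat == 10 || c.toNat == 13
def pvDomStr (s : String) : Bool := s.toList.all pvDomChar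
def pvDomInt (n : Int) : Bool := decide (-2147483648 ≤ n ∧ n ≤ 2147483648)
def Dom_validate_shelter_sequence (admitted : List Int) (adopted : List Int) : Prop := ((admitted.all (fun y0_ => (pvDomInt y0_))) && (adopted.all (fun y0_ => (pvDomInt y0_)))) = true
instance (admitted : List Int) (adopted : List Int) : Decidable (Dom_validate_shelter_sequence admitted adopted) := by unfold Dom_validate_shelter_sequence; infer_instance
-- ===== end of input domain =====

-- B flips the traversal: it iterates over admitted, pushing each animal and greedily
-- popping while the stack top matches the next adopted animal (the textbook
-- validate-stack-sequences loop), instead of A's adopted-driven push-until-match loop.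


-- ===== PORT A =====
-- inner `while (not stack) or stack[-1] != x` loop: push from the remaining admitted
-- list (= admitted[i:]); `none` = the `return False` inside it.  The stack is kept
-- top-first (append = cons, stack[-1] = head, pop = tail).
def vssInner (stack : List Int) (rem : List Int) (x : Int) :
    Option (List Int × List Int) :=
  if stack.head? = some x then
    some (stack.tail, rem)
  else
    match rem with
    | [] => none
    | a :: rs => vssInner (a :: stack) rs x

-- outer `for x in adopted` loop of A
def vssOuter : List Int → List Int → List Int → Bool
  | _, _, [] => true
  | stack, rem, x :: xs =>
    match vssInner stack rem x with
    | none => false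
    | some (s, r) => vssOuter s r xs

def validate_shelter_sequence (admitted : List Int) (adopted : List Int) : Bool :=
  vssOuter [] admitted adopted

-- ===== PORT B =====
-- inner `while stack and j < n and stack[-1] == adopted[j]` loop of B
def vssPop : List Int → List Int → Nat → List Int × Nat
  | [], _, j => ([], j)
  | top :: rest, adopted, j =>
    if adopted[j]? = some top then vssPop rest adopted (j + 1)
    else (top :: rest, j)

def validate_shelter_sequence_alt (admitted : List Int) (adopted : List Int) : Bool :=
  let st := admitted.foldl (fun st x => vssPop (x :: st.1) adopted st.2) ([], 0)
  st.2 == adopted.length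

-- ===== PRECONDITION & SPEC =====
def Spec_validate_shelter_sequence (admitted : List Int) (adopted : List Int) (out : Bool) : Prop := out = validate_shelter_sequence_alt admitted adopted
instance (admitted : List Int) (adopted : List Int) (out : Bool) : Decidable (Spec_validate_shelter_sequence admitted adopted out) := by unfold Spec_validate_shelter_sequence; infer_instance

-- ===== CLAIM (what is proved, stated in full; the proofs are below) =====
def Claim_equal_validate_shelter_sequence : Prop := ∀ (admitted : List Int) (adopted : List Int), Dom_validate_shelter_sequence admitted adopted → Spec_validate_shelter_sequence admitted adopted (validate_shelter_sequence admitted adopted)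

-- ===== LEMMAS AND PROOFS =====

-- abstract B-side machinery: pop while the heads match, over an explicit
-- remaining-adopted list instead of an index
def bPop : List Int → List Int → List Int × List Int
  | t :: s, y :: ys => if t = y then bPop s ys else (t :: s, y :: ys)
  | s, ys => (s, ys)

-- the whole B run (state after all of admitted has been processed)
def bRun : List Int → List Int → List Int → List Int × List Int
  | [], s, ys => (s, ys)
  | a :: r, s, ys => bRun r (bPop (a :: s) ys).1 (bPop (a :: s) ys).2

theorem bPop_nil_right (s : List Int) : bPop s [] = (s, []) := by
  cases s <;> simp [bPop]

theorem bRun_nil_right (r : List Int) : ∀ s, (bRun r s []).2 = [] := by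
  induction r with
  | nil => intro s; simp [bRun]
  | cons a r ih =>
    intro s
    simpa [bRun, bPop_nil_right] using ih (a :: s)

-- main bridge: A's run from state (stack, rem) on adopted-suffix ys equals
-- "normalize by bPop, then run B on rem and test emptiness of the leftover adopted"
theorem aRun_eq_bRun :
    ∀ (n : Nat) (r ys s : List Int), r.length + ys.length ≤ n →
      vssOuter s r ys = ((bRun r (bPop s ys).1 (bPop s ys).2).2.isEmpty) := by
  intro n
  induction n with
  | zero =>
    intro r ys s h
    have hr : r = [] := by cases r <;> simp_all
    have hy : ys = [] := by cases ys <;> simp_all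
    subst hr; subst hy
    simp [vssOuter, bPop_nil_right, bRun]
  | succ n ih =>
    intro r ys s h
    cases ys with
    | nil => simp [vssOuter, bPop_nil_right, bRun_nil_right]
    | cons y ys' =>
      by_cases hm : s.head? = some y
      · -- match: A pops immediately; bPop pops the same element
        obtain ⟨t, s', rfl⟩ : ∃ t s', s = t :: s' := by
          cases s with
          | nil => simp at hm
          | cons t s' => exact ⟨t, s', rfl⟩
        have ht : t = y := by simpa using hm
        subst ht
        have hv : vssInner (t :: s') r t = some (s', r) := by
          rw [vssInner.eq_def]
          simp
        have hbp : bPop (t :: s') (t :: ys') = bPop s' ys' := by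
          simp [bPop]
        have hih := ih r ys' s' (by simp at h ⊢; omega)
        simp only [vssOuter, hv, hbp]
        exact hih
      · -- mismatch (or empty stack): A pushes from rem; bPop is the identity here
        have hbp : bPop s (y :: ys') = (s, y :: ys') := by
          cases s with
          | nil => simp [bPop]
          | cons t s' =>
            have : ¬ t = y := by simpa using hm
            simp [bPop, this]
        cases r with
        | nil =>
          -- A returns False; B's leftover adopted is y :: ys' ≠ []
          have : vssInner s [] y = none := by
            simp [vssInner, hm]
          simp [vssOuter, this, hbp, bRun]
        | cons a r' =>
          have hstep : vssInner s (a :: r') y = vssInner (a :: s) r' y := by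
            simp [vssInner, hm]
          have hA : vssOuter s (a :: r') (y :: ys') =
              vssOuter (a :: s) r' (y :: ys') := by
            simp only [vssOuter, hstep]
          have := ih r' (y :: ys') (a :: s) (by simp at h ⊢; omega)
          rw [hA, this]
          simp [hbp, bRun]

-- index/suffix bridge for B's inner loop
theorem vssPop_eq_bPop (adopted : List Int) :
    ∀ (s : List Int) (j : Nat), j ≤ adopted.length →
      (vssPop s adopted j).1 = (bPop s (adopted.drop j)).1 ∧
      adopted.drop (vssPop s adopted j).2 = (bPop s (adopted.drop j)).2 ∧
      (vssPop s adopted j).2 ≤ adopted.length := by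
  intro s
  induction s with
  | nil => intro j hj; simp [vssPop, bPop, hj]
  | cons t rest ih =>
    intro j hj
    have hhd : (adopted.drop j).head? = adopted[j]? := by
      simp [List.head?_drop]
    by_cases hg : adopted[j]? = some t
    · have hjlt : j < adopted.length := by
        by_contra hge
        have : adopted[j]? = none := by
          exact List.getElem?_eq_none (by omega)
        simp [this] at hg
      have hdrop : adopted.drop j = t :: adopted.drop (j + 1) := by
        rw [hg] at hhd
        cases hd : adopted.drop j with
        | nil => rw [hd] at hhd; simp at hhd
        | cons z zs =>
          rw [hd] at hhd
          have hz : z = t := by simpa using hhd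
          have hzs : zs = adopted.drop (j + 1) := by
            have h' : (adopted.drop j).tail = adopted.drop (j + 1) := by
              simp [List.tail_drop]
            simpa [hd] using h'
          simp [hz, hzs]
      have := ih (j + 1) (by omega)
      simpa [vssPop, hg, hdrop, bPop] using this
    · have hne : ∀ zs z, adopted.drop j = z :: zs → ¬ t = z := by
        intro zs z hd ht
        apply hg
        rw [← hhd, hd, ht]
        simp
      have : bPop (t :: rest) (adopted.drop j) = (t :: rest, adopted.drop j) := by
        cases hd : adopted.drop j with
        | nil => simp [bPop]
        | cons z zs => simp [bPop, hne zs z hd]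
      simp [vssPop, hg, this, hj]

-- the whole foldl of B, related to bRun
theorem foldl_eq_bRun (adopted : List Int) :
    ∀ (r : List Int) (s : List Int) (j : Nat), j ≤ adopted.length →
      (r.foldl (fun st x => vssPop (x :: st.1) adopted st.2) (s, j)).1 =
        (bRun r s (adopted.drop j)).1 ∧
      adopted.drop
          (r.foldl (fun st x => vssPop (x :: st.1) adopted st.2) (s, j)).2 =
        (bRun r s (adopted.drop j)).2 ∧
      (r.foldl (fun st x => vssPop (x :: st.1) adopted st.2) (s, j)).2 ≤
        adopted.length := by
  intro r
  induction r with
  | nil => intro s j hj; simp [bRun, hj]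
  | cons a r' ih =>
    intro s j hj
    obtain ⟨h1, h2, h3⟩ := vssPop_eq_bPop adopted (a :: s) j hj
    have := ih (vssPop (a :: s) adopted j).1 (vssPop (a :: s) adopted j).2 h3
    simp only [List.foldl_cons, bRun]
    rw [← h1, ← h2]
    exact this

-- ===== VERDICT (by name: the statement is the Claim_ definition above) =====
theorem validate_shelter_sequence_spec : Claim_equal_validate_shelter_sequence := by
  intro admitted adopted _
  unfold Spec_validate_shelter_sequence
  unfold validate_shelter_sequence validate_shelter_sequence_alt
  obtain ⟨h1, h2, h3⟩ := foldl_eq_bRun adopted admitted [] 0 (by omega)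
  simp only [List.drop_zero] at h1 h2
  have hbp : bPop [] adopted = ([], adopted) := by cases adopted <;> simp [bPop]
  have hA := aRun_eq_bRun (admitted.length + adopted.length) admitted adopted []
    (by omega)
  rw [hbp] at hA
  rw [hA]
  simp only
  rw [← h2]
  rcases Nat.lt_or_ge (admitted.foldl
      (fun st x => vssPop (x :: st.1) adopted st.2) ([], 0)).2 adopted.length
    with hlt | hge
  · have hne : adopted.drop (admitted.foldl
        (fun st x => vssPop (x :: st.1) adopted st.2) ([], 0)).2 ≠ [] := by
      simp [List.drop_eq_nil_iff]; omega
    have hneq : ((admitted.foldl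
        (fun st x => vssPop (x :: st.1) adopted st.2) ([], 0)).2 ==
        adopted.length) = false := by
      simp; omega
    simp [hneq, hne]
  · have hj : (admitted.foldl
        (fun st x => vssPop (x :: st.1) adopted st.2) ([], 0)).2 =
        adopted.length := le_antisymm h3 hge
    simp [hj]
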